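-- pv_equiv track=rewrite | github.com/qeedquan/challenges | codewars/simple-fun-#221-furthest-distance-of-same-letter.py | dsl
-- ===== SOURCE A (Python) =====
-- def dsl(string):
--     index0, index1 = {}, {}
--     for index in range(len(string)):
--         symbol = string[index]
--         if string[index] not in index0:
--             index0[symbol] = index
--         else:
--             index1[symbol] = index
--
--     character, max_distance = 0, 0
--     for key in index0:
--         if key in index1:
--             distance = index1[key] - index0[key] + 1
--             if distance > max_distance:
--                 character, max_distance = key, distance
--     return f"{character}{max_distance}"
-- ===== SOURCE B (Python) =====
-- def dsl(string):
--     # One pass: remember each character's first index; on every repeat occurrence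
--     # update the running best distance (strict >, so earliest achiever wins).
--     first = {}
--     best_c, best_d = "0", 0
--     for i, c in enumerate(string):
--         if c in first:
--             d = i - first[c] + 1
--             if d > best_d:
--                 best_c, best_d = c, d
--         else:
--             first[c] = i
--     return best_c + str(best_d)
-- ===== Notes on version B (the rewrite author's own statement) =====
-- stated objective: simpler
-- what changed: B computes the answer in a single pass: it keeps only each character's first index and updates the running best distance at every repeat occurrence (strict >, so the earliest achiever wins, matching A's first-occurrence-order tie-break), instead of A's two dicts followed by a separate scan over the dict of first occurrences.
import Mathlib
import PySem

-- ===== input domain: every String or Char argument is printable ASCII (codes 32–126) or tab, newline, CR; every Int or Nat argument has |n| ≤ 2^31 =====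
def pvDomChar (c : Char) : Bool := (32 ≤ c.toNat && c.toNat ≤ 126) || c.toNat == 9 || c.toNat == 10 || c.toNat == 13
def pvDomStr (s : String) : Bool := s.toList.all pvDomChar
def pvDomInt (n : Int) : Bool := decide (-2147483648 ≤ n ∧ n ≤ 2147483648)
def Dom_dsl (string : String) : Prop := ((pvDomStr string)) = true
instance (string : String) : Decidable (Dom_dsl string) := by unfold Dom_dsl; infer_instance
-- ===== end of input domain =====

-- B replaces A's two occurrence dicts plus a second scan over them by a single pass that
-- keeps only first-occurrence indices and a running best (objective: simpler).

-- ===== PORT A =====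
-- one loop iteration of A's first loop: 'if symbol not in index0: index0[symbol]=index else: index1[symbol]=index'
def dslUpd (st : PySem.Dict Char Int × PySem.Dict Char Int) (index : Int) (symbol : Char) :
    PySem.Dict Char Int × PySem.Dict Char Int :=
  if st.1.contains symbol = false then (st.1.insert symbol index, st.2)
  else (st.1, st.2.insert symbol index)

-- one iteration of A's second loop over the keys of index0
def dslPick (p : PySem.Dict Char Int × PySem.Dict Char Int) (acc : String × Int) (key : Char) :
    String × Int :=
  if p.2.contains key then
    let distance := p.2.getD key 0 - p.1.getD key 0 + 1
    if distance > acc.2 then (String.ofList [key], distance) else acc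
  else acc

def dsl (string : String) : String :=
  let cs := string.toList
  -- for index in range(len(string)): symbol = string[index]; …   (index is always in range, so the
  -- pyGetD default ' ' is never used)
  let p := (PySem.List.pyRange 0 (PySem.Str.len string) 1).foldl
      (fun st index => dslUpd st index (PySem.List.pyGetD cs index ' '))
      (PySem.Dict.empty, PySem.Dict.empty)
  -- character, max_distance = 0, 0  (f"{0}" = "0", so the character accumulator is the string "0")
  let r := p.1.keys.foldl (dslPick p) ("0", 0)
  r.1 ++ PySem.Int.toStr r.2

-- ===== PORT B =====
-- one iteration of B's single loop over enumerate(string)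
def dslAltStep (st : PySem.Dict Char Int × String × Int) (ic : Int × Char) :
    PySem.Dict Char Int × String × Int :=
  if st.1.contains ic.2 then
    let d := ic.1 - st.1.getD ic.2 0 + 1
    if d > st.2.2 then (st.1, String.ofList [ic.2], d) else st
  else (st.1.insert ic.2 ic.1, st.2)

def dsl_alt (string : String) : String :=
  let st := (PySem.List.enumerate string.toList 0).foldl dslAltStep
      (PySem.Dict.empty, ("0", 0))
  st.2.1 ++ PySem.Int.toStr st.2.2

-- ===== PRECONDITION & SPEC =====
def Spec_dsl (string : String) (out : String) : Prop := out = dsl_alt string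
instance (string : String) (out : String) : Decidable (Spec_dsl string out) := by unfold Spec_dsl; infer_instance

-- ===== CLAIM (what is proved, stated in full; the proofs are below) =====
def Claim_equal_dsl : Prop := ∀ (string : String), Dom_dsl string → Spec_dsl string (dsl string)

-- ===== LEMMAS AND PROOFS =====

-- A's first-loop state and B's loop state over a char list
def pvPA (l : List Char) : PySem.Dict Char Int × PySem.Dict Char Int :=
  (PySem.List.enumerate l 0).foldl (fun st p => dslUpd st p.1 p.2)
    (PySem.Dict.empty, PySem.Dict.empty)

def pvPB (l : List Char) : PySem.Dict Char Int × String × Int :=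
  (PySem.List.enumerate l 0).foldl dslAltStep (PySem.Dict.empty, ("0", 0))

-- first-occurrence index (meaningful for x ∈ l) and last-occurrence index (meaningful for x ∈ l)
def pvFirst (l : List Char) (x : Char) : Nat := (PySem.List.index? l x).getD 0
def pvLast (l : List Char) (x : Char) : Int := ((l.length - 1 - l.reverse.idxOf x : Nat) : Int)

-- abstract form of A's second loop: strict running max over per-key optional distances
def pvF (dist : Char → Option Int) (ks : List Char) (b : String × Int) : String × Int :=
  ks.foldl (fun acc k =>
    match dist k with
    | some dv => if dv > acc.2 then (String.ofList [k], dv) else acc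
    | none => acc) b

def pvDist (p : PySem.Dict Char Int × PySem.Dict Char Int) (k : Char) : Option Int :=
  if p.2.contains k then some (p.2.getD k 0 - p.1.getD k 0 + 1) else none

lemma pvPA_append (l : List Char) (c : Char) :
    pvPA (l ++ [c]) = dslUpd (pvPA l) (l.length : Int) c := by
  simp [pvPA, PySem.List.enumerate_append, List.foldl_append,
    PySem.List.enumerate_cons, PySem.List.enumerate_nil]

lemma pvPB_append (l : List Char) (c : Char) :
    pvPB (l ++ [c]) = dslAltStep (pvPB l) ((l.length : Int), c) := by
  simp [pvPB, PySem.List.enumerate_append, List.foldl_append,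
    PySem.List.enumerate_cons, PySem.List.enumerate_nil]

lemma pvIndex?_eq {l : List Char} {x : Char} (h : x ∈ l) :
    PySem.List.index? l x = some (pvFirst l x) := by
  rcases hi : PySem.List.index? l x with _ | k
  · exact absurd ((PySem.List.index?_eq_none_iff l x).mp hi) (by simp [h])
  · simp only [pvFirst, hi, Option.getD_some]

lemma pvFirst_lt_length {l : List Char} {x : Char} (h : x ∈ l) :
    pvFirst l x < l.length := by
  obtain ⟨hk, -, -⟩ := PySem.List.getElem_of_index?_eq_some (pvIndex?_eq h)
  exact hk

lemma pvFirst_append_of_mem {l : List Char} {x : Char} (t : List Char) (h : x ∈ l) :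
    pvFirst (l ++ t) x = pvFirst l x := by
  unfold pvFirst
  rw [PySem.List.index?_append_of_mem t h]

lemma pvLast_le {l : List Char} (x : Char) (h : l ≠ []) :
    pvLast l x ≤ (l.length : Int) - 1 := by
  have h1 : 1 ≤ l.length := List.length_pos_iff.mpr h
  unfold pvLast
  omega

lemma pvDedup_append (l : List Char) (c : Char) :
    PySem.List.dedup (l ++ [c]) =
      if c ∈ l then PySem.List.dedup l else PySem.List.dedup l ++ [c] := by
  have hd : ∀ m : List Char, PySem.List.dedup m = PySem.Set.ofList m :=
    fun m => PySem.List.dedup_eq_ofList m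
  rw [hd, hd, PySem.Set.ofList_append_singleton]
  by_cases h : c ∈ l
  · rw [if_pos h, PySem.Set.add_of_mem ((PySem.Set.mem_ofList l c).mpr h)]
  · rw [if_neg h, PySem.Set.add_of_not_mem (fun hm => h ((PySem.Set.mem_ofList l c).mp hm))]

lemma pvPA_get? (l : List Char) (x : Char) :
    (pvPA l).1.get? x = (PySem.List.index? l x).map (fun n => (n : Int)) := by
  induction l using List.reverseRecOn generalizing x with
  | nil =>
    rw [(PySem.List.index?_eq_none_iff [] x).mpr (by simp)]
    simp [pvPA, PySem.List.enumerate_nil]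
  | append_singleton l c ih =>
    rw [pvPA_append]
    have hcont : (pvPA l).1.contains c = decide (c ∈ l) := by
      rw [PySem.Dict.contains_eq_isSome_get?, ih]
      by_cases hm : c ∈ l
      · rw [pvIndex?_eq hm]; simp [hm]
      · rw [(PySem.List.index?_eq_none_iff l c).mpr hm]; simp [hm]
    by_cases hm : c ∈ l
    · have h1 : dslUpd (pvPA l) (l.length : Int) c
          = ((pvPA l).1, (pvPA l).2.insert c (l.length : Int)) := by
        simp [dslUpd, hcont, hm]
      rw [h1]
      rw [ih]
      by_cases hx : x ∈ l
      · rw [PySem.List.index?_append_of_mem [c] hx]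
      · have hxc : x ≠ c := fun h => hx (h ▸ hm)
        rw [(PySem.List.index?_eq_none_iff l x).mpr hx,
          (PySem.List.index?_eq_none_iff (l ++ [c]) x).mpr (by simp [hx, hxc])]
    · have h1 : dslUpd (pvPA l) (l.length : Int) c
          = ((pvPA l).1.insert c (l.length : Int), (pvPA l).2) := by
        simp [dslUpd, hcont, hm]
      rw [h1]
      rw [PySem.Dict.get?_insert]
      by_cases hxc : x = c
      · subst hxc
        rw [if_pos rfl, PySem.List.index?_append_singleton_self _ _ hm]
        simp
      · rw [if_neg hxc, ih]
        by_cases hx : x ∈ l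
        · rw [PySem.List.index?_append_of_mem [c] hx]
        · rw [(PySem.List.index?_eq_none_iff l x).mpr hx,
            (PySem.List.index?_eq_none_iff (l ++ [c]) x).mpr (by simp [hx, hxc])]

lemma pvPA_contains (l : List Char) (x : Char) :
    (pvPA l).1.contains x = decide (x ∈ l) := by
  rw [PySem.Dict.contains_eq_isSome_get?, pvPA_get?]
  by_cases hm : x ∈ l
  · rw [pvIndex?_eq hm]; simp [hm]
  · rw [(PySem.List.index?_eq_none_iff l x).mpr hm]; simp [hm]

lemma pvPA_keys (l : List Char) : (pvPA l).1.keys = PySem.List.dedup l := by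
  induction l using List.reverseRecOn with
  | nil => simp [pvPA, PySem.List.enumerate_nil]
  | append_singleton l c ih =>
    rw [pvPA_append, pvDedup_append]
    by_cases hm : c ∈ l
    · have h1 : dslUpd (pvPA l) (l.length : Int) c
          = ((pvPA l).1, (pvPA l).2.insert c (l.length : Int)) := by
        simp [dslUpd, pvPA_contains, hm]
      rw [h1, if_pos hm]
      exact ih
    · have h1 : dslUpd (pvPA l) (l.length : Int) c
          = ((pvPA l).1.insert c (l.length : Int), (pvPA l).2) := by
        simp [dslUpd, pvPA_contains, hm]
      rw [h1, if_neg hm]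
      dsimp only
      rw [PySem.Dict.keys_insert_of_not_contains _ _ (by rw [pvPA_contains]; simp [hm]), ih]

lemma pvPA2_get? (l : List Char) (x : Char) :
    (pvPA l).2.get? x = if 2 ≤ l.count x then some (pvLast l x) else none := by
  induction l using List.reverseRecOn generalizing x with
  | nil => simp [pvPA, PySem.List.enumerate_nil]
  | append_singleton l c ih =>
    rw [pvPA_append]
    have hlast_ne : ∀ y : Char, y ≠ c → y ∈ l → pvLast (l ++ [c]) y = pvLast l y := by
      intro y hyc hyl
      unfold pvLast
      rw [List.reverse_append]
      simp only [List.reverse_singleton, List.singleton_append,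
        List.idxOf_cons_ne _ (fun h => hyc h.symm), List.length_append,
        List.length_singleton]
      have hk : l.reverse.idxOf y < l.reverse.length :=
        List.idxOf_lt_length_of_mem (by simpa using hyl)
      rw [List.length_reverse] at hk
      omega
    by_cases hm : c ∈ l
    · have h1 : dslUpd (pvPA l) (l.length : Int) c
          = ((pvPA l).1, (pvPA l).2.insert c (l.length : Int)) := by
        simp [dslUpd, pvPA_contains, hm]
      rw [h1]
      dsimp only
      rw [PySem.Dict.get?_insert]
      by_cases hxc : x = c
      · subst hxc
        have hcount : 2 ≤ (l ++ [x]).count x := by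
          have h0 : 0 < l.count x := List.count_pos_iff.mpr hm
          have h1 : (l ++ [x]).count x = l.count x + 1 := by simp
          omega
        rw [if_pos rfl, if_pos hcount]
        congr 1
        unfold pvLast
        rw [List.reverse_append]
        simp only [List.reverse_singleton, List.singleton_append, List.idxOf_cons_self,
          List.length_append, List.length_singleton]
        omega
      · have hcnt : (l ++ [c]).count x = l.count x := by
          simp [List.count_append, Ne.symm hxc]
        rw [if_neg hxc, ih, hcnt]
        by_cases h2 : 2 ≤ l.count x
        · rw [if_pos h2, if_pos h2, hlast_ne x hxc
            (List.count_pos_iff.mp (by omega))]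
        · rw [if_neg h2, if_neg h2]
    · have h1 : dslUpd (pvPA l) (l.length : Int) c
          = ((pvPA l).1.insert c (l.length : Int), (pvPA l).2) := by
        simp [dslUpd, pvPA_contains, hm]
      rw [h1]
      dsimp only
      rw [ih]
      by_cases hxc : x = c
      · subst hxc
        have h0 : l.count x = 0 := List.count_eq_zero.mpr hm
        have hcnt : (l ++ [x]).count x = 1 := by
          simp [List.count_append, h0]
        rw [hcnt, if_neg (by omega), if_neg (by omega)]
      · have hcx : (c == x) = false := by
          simp only [beq_eq_false_iff_ne, ne_eq]
          exact Ne.symm hxc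
        have hcnt : (l ++ [c]).count x = l.count x := by
          simp [List.count_append, List.count_singleton, hcx]
        rw [hcnt]
        by_cases h2 : 2 ≤ l.count x
        · rw [if_pos h2, if_pos h2, hlast_ne x hxc
            (List.count_pos_iff.mp (by omega))]
        · rw [if_neg h2, if_neg h2]

lemma pvPB_fst (l : List Char) : (pvPB l).1 = (pvPA l).1 := by
  induction l using List.reverseRecOn with
  | nil => simp [pvPA, pvPB, PySem.List.enumerate_nil]
  | append_singleton l c ih =>
    rw [pvPA_append, pvPB_append]
    by_cases hm : (pvPA l).1.contains c = true
    · have hb : (pvPB l).1.contains c = true := by rw [ih]; exact hm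
      simp only [dslAltStep, dslUpd, hb, hm, Bool.true_eq_false, if_true, if_false]
      split <;> exact ih
    · have hm' : (pvPA l).1.contains c = false := by simpa using hm
      have hb : (pvPB l).1.contains c = false := by rw [ih]; exact hm'
      simp only [dslAltStep, dslUpd, hb, hm', Bool.false_eq_true, if_true, if_false]
      rw [ih]

lemma pvF_mono (dist : Char → Option Int) (ks : List Char) (b : String × Int) :
    b.2 ≤ (pvF dist ks b).2 := by
  induction ks generalizing b with
  | nil => simp [pvF]
  | cons k ks ih =>
    simp only [pvF, List.foldl_cons]
    rcases h : dist k with _ | dv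
    · exact ih b
    · by_cases hd : dv > b.2
      · simp only [hd, if_pos]
        exact le_trans (le_of_lt hd) (ih _)
      · simp only [hd]
        exact ih b

lemma pvF_lt (dist : Char → Option Int) (ks : List Char) (b : String × Int) (D : Int)
    (hb : b.2 < D) (h : ∀ k ∈ ks, ∀ dv, dist k = some dv → dv < D) :
    (pvF dist ks b).2 < D := by
  induction ks generalizing b with
  | nil => simpa [pvF] using hb
  | cons k ks ih =>
    simp only [pvF, List.foldl_cons]
    rcases hk : dist k with _ | dv
    · exact ih b hb (fun k hm => h k (List.mem_cons_of_mem _ hm))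
    · have hdv : dv < D := h k (List.mem_cons_self) dv hk
      by_cases hd : dv > b.2
      · simp only [hd, if_pos]
        exact ih _ hdv (fun k hm => h k (List.mem_cons_of_mem _ hm))
      · simp only [hd]
        exact ih b hb (fun k hm => h k (List.mem_cons_of_mem _ hm))

lemma pvF_const (dist : Char → Option Int) (ks : List Char) (b : String × Int)
    (h : ∀ k ∈ ks, ∀ dv, dist k = some dv → ¬ dv > b.2) :
    pvF dist ks b = b := by
  induction ks with
  | nil => simp [pvF]
  | cons k ks ih =>
    simp only [pvF, List.foldl_cons]
    rcases hk : dist k with _ | dv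
    · exact ih (fun k hm => h k (List.mem_cons_of_mem _ hm))
    · have : ¬ dv > b.2 := h k (List.mem_cons_self) dv hk
      simp only [this]
      exact ih (fun k hm => h k (List.mem_cons_of_mem _ hm))

lemma pvF_congr (dist0 dist1 : Char → Option Int) (ks : List Char) (b : String × Int)
    (h : ∀ k ∈ ks, dist1 k = dist0 k) :
    pvF dist1 ks b = pvF dist0 ks b := by
  induction ks generalizing b with
  | nil => rfl
  | cons k ks ih =>
    simp only [pvF, List.foldl_cons, h k (List.mem_cons_self)]
    exact ih _ (fun k hm => h k (List.mem_cons_of_mem _ hm))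

lemma pvF_insert (dist0 dist1 : Char → Option Int) (ks₁ ks₂ : List Char) (c : Char)
    (dnew : Int) (b : String × Int)
    (hc1 : dist1 c = some dnew)
    (hagree : ∀ k, k ≠ c → dist1 k = dist0 k)
    (hc0 : ∀ dold, dist0 c = some dold → dold < dnew)
    (h2 : ∀ k ∈ ks₂, ∀ dv, dist0 k = some dv → dv < dnew)
    (hn1 : c ∉ ks₁) (hn2 : c ∉ ks₂) :
    pvF dist1 (ks₁ ++ c :: ks₂) b =
      (if dnew > (pvF dist0 (ks₁ ++ c :: ks₂) b).2 then (String.ofList [c], dnew)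
       else pvF dist0 (ks₁ ++ c :: ks₂) b) := by
  have hsplit : ∀ (dist : Char → Option Int) (bb : String × Int),
      pvF dist (ks₁ ++ c :: ks₂) bb = pvF dist ks₂
        (match dist c with
         | some dv => if dv > (pvF dist ks₁ bb).2 then (String.ofList [c], dv)
                      else pvF dist ks₁ bb
         | none => pvF dist ks₁ bb) := by
    intro dist bb
    unfold pvF
    rw [List.foldl_append, List.foldl_cons]
  have h₁ : pvF dist1 ks₁ b = pvF dist0 ks₁ b :=
    pvF_congr _ _ _ _ (fun k hk => hagree k (fun he => hn1 (he ▸ hk)))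
  have h₂ : ∀ bb, pvF dist1 ks₂ bb = pvF dist0 ks₂ bb := fun bb =>
    pvF_congr _ _ _ _ (fun k hk => hagree k (fun he => hn2 (he ▸ hk)))
  rw [hsplit, hsplit, h₁, hc1, h₂]
  dsimp only
  by_cases hgt : dnew > (pvF dist0 ks₁ b).2
  · rw [if_pos hgt]
    rw [pvF_const dist0 ks₂ (String.ofList [c], dnew)
      (fun k hk dv hdv => not_lt.mpr (le_of_lt (h2 k hk dv hdv)))]
    have hmid : (match dist0 c with
         | some dv => if dv > (pvF dist0 ks₁ b).2 then (String.ofList [c], dv)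
                      else pvF dist0 ks₁ b
         | none => pvF dist0 ks₁ b).2 < dnew := by
      rcases hd0 : dist0 c with _ | dold
      · exact hgt
      · have hlt := hc0 dold hd0
        dsimp only
        split
        · exact hlt
        · exact hgt
    have hr := pvF_lt dist0 ks₂ _ dnew hmid h2
    rw [if_pos hr]
  · rw [if_neg hgt]
    have hmid0 : (match dist0 c with
         | some dv => if dv > (pvF dist0 ks₁ b).2 then (String.ofList [c], dv)
                      else pvF dist0 ks₁ b
         | none => pvF dist0 ks₁ b) = pvF dist0 ks₁ b := by
      rcases hd0 : dist0 c with _ | dold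
      · rfl
      · have hlt := hc0 dold hd0
        have hle : dnew ≤ (pvF dist0 ks₁ b).2 := not_lt.mp hgt
        dsimp only
        rw [if_neg (not_lt.mpr (by omega))]
    rw [hmid0]
    have hle2 : dnew ≤ (pvF dist0 ks₂ (pvF dist0 ks₁ b)).2 :=
      le_trans (not_lt.mp hgt) (pvF_mono dist0 ks₂ _)
    rw [if_neg (not_lt.mpr hle2)]

lemma pvPick_eq_pvF (p : PySem.Dict Char Int × PySem.Dict Char Int) (ks : List Char)
    (b : String × Int) : ks.foldl (dslPick p) b = pvF (pvDist p) ks b := by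
  unfold pvF
  have h : dslPick p = fun acc k =>
      match pvDist p k with
      | some dv => if dv > acc.2 then (String.ofList [k], dv) else acc
      | none => acc := by
    funext acc k
    unfold dslPick pvDist
    by_cases hc : p.2.contains k = true <;> simp [hc]
  rw [h]

lemma pvDedup_pairwise (l : List Char) :
    (PySem.List.dedup l).Pairwise (fun a b => pvFirst l a < pvFirst l b) := by
  induction l using List.reverseRecOn with
  | nil => simp
  | append_singleton l c ih =>
    rw [pvDedup_append]
    by_cases hm : c ∈ l
    · rw [if_pos hm]
      refine ih.imp_of_mem ?_
      intro a b ha hb hr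
      have ha' : a ∈ l := (PySem.List.mem_dedup l a).mp ha
      have hb' : b ∈ l := (PySem.List.mem_dedup l b).mp hb
      rwa [pvFirst_append_of_mem [c] ha', pvFirst_append_of_mem [c] hb']
    · rw [if_neg hm, List.pairwise_append]
      refine ⟨ih.imp_of_mem ?_, List.pairwise_singleton _ _, ?_⟩
      · intro a b ha hb hr
        have ha' : a ∈ l := (PySem.List.mem_dedup l a).mp ha
        have hb' : b ∈ l := (PySem.List.mem_dedup l b).mp hb
        rwa [pvFirst_append_of_mem [c] ha', pvFirst_append_of_mem [c] hb']
      · intro a ha b hb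
        rw [List.mem_singleton] at hb
        subst hb
        have ha' : a ∈ l := (PySem.List.mem_dedup l a).mp ha
        rw [pvFirst_append_of_mem [b] ha']
        have h1 : pvFirst l a < l.length := pvFirst_lt_length ha'
        have h2 : pvFirst (l ++ [b]) b = l.length := by
          unfold pvFirst
          rw [PySem.List.index?_append_singleton_self _ _ hm]
          rfl
        omega

lemma pvPB_snd (l : List Char) :
    (pvPB l).2 = pvF (pvDist (pvPA l)) (PySem.List.dedup l) ("0", 0) := by
  induction l using List.reverseRecOn with
  | nil => simp [pvPB, pvF, PySem.List.enumerate_nil]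
  | append_singleton l c ih =>
    rw [pvPB_append, pvDedup_append]
    by_cases hm : c ∈ l
    · -- repeat occurrence: B updates the running best; A's abstract fold gains a larger
      -- distance at key c, and pvF_insert shows that is the same update
      have hcont : (pvPA l).1.contains c = true := by rw [pvPA_contains]; simp [hm]
      have hbcont : (pvPB l).1.contains c = true := by rw [pvPB_fst]; exact hcont
      have hP' : pvPA (l ++ [c]) = ((pvPA l).1, (pvPA l).2.insert c (l.length : Int)) := by
        rw [pvPA_append]; simp [dslUpd, hcont]
      have hfidx : PySem.List.index? l c = some (pvFirst l c) := pvIndex?_eq hm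
      have hfirst : (pvPA l).1.getD c 0 = (pvFirst l c : Int) := by
        rw [PySem.Dict.getD_eq_get?_getD, pvPA_get?, hfidx]
        rfl
      have hflt : pvFirst l c < l.length := pvFirst_lt_length hm
      have hne : l ≠ [] := List.ne_nil_of_mem hm
      set dnew : Int := (l.length : Int) - (pvPA l).1.getD c 0 + 1 with hdnew
      have hstep : dslAltStep (pvPB l) ((l.length : Int), c)
          = ((pvPB l).1,
             if dnew > (pvPB l).2.2 then (String.ofList [c], dnew) else (pvPB l).2) := by
        simp only [dslAltStep, hbcont, if_true]
        rw [show (pvPB l).1.getD c 0 = (pvPA l).1.getD c 0 from by rw [pvPB_fst]]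
        split <;> rfl
      rw [hstep, if_pos hm, hP']
      dsimp only
      -- split the dedup list at c
      obtain ⟨ks₁, ks₂, hsp⟩ := List.append_of_mem ((PySem.List.mem_dedup l c).mpr hm)
      have hnd := PySem.List.nodup_dedup l
      rw [hsp] at hnd
      have hn1 : c ∉ ks₁ := fun h =>
        (List.disjoint_of_nodup_append hnd) h (List.mem_cons_self)
      have hn2 : c ∉ ks₂ := by
        have := (List.nodup_append.mp hnd).2.1
        exact (List.nodup_cons.mp this).1
      have hpw := pvDedup_pairwise l
      rw [hsp] at hpw
      have hks₂ : ∀ x ∈ ks₂, pvFirst l c < pvFirst l x := by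
        have := (List.pairwise_append.mp hpw).2.1
        exact (List.pairwise_cons.mp this).1
      -- facts about the two distance functions
      have hdist1c : pvDist ((pvPA l).1, (pvPA l).2.insert c (l.length : Int)) c
          = some dnew := by
        unfold pvDist
        rw [PySem.Dict.contains_eq_isSome_get?]
        rw [PySem.Dict.get?_insert]
        simp only [Option.isSome_some, if_true]
        rw [PySem.Dict.getD_insert]
        simp [hdnew]
      have hagree : ∀ k, k ≠ c →
          pvDist ((pvPA l).1, (pvPA l).2.insert c (l.length : Int)) k
            = pvDist (pvPA l) k := by
        intro k hk
        unfold pvDist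
        rw [PySem.Dict.contains_eq_isSome_get?, PySem.Dict.get?_insert, if_neg hk,
          PySem.Dict.getD_insert, if_neg hk, ← PySem.Dict.contains_eq_isSome_get?]
      have hdist0 : ∀ x dv, pvDist (pvPA l) x = some dv →
          dv = pvLast l x - (pvFirst l x : Int) + 1 ∧ 2 ≤ List.count x l := by
        intro x dv hdv
        unfold pvDist at hdv
        rw [PySem.Dict.contains_eq_isSome_get?, pvPA2_get?] at hdv
        by_cases h2 : 2 ≤ List.count x l
        · rw [if_pos h2] at hdv
          simp only [Option.isSome_some, if_true] at hdv
          have hxl : x ∈ l := List.count_pos_iff.mp (by omega)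
          have hget : (pvPA l).2.getD x 0 = pvLast l x := by
            rw [PySem.Dict.getD_eq_get?_getD, pvPA2_get?, if_pos h2]
            rfl
          have hget1 : (pvPA l).1.getD x 0 = (pvFirst l x : Int) := by
            rw [PySem.Dict.getD_eq_get?_getD, pvPA_get?, pvIndex?_eq hxl]
            rfl
          rw [hget, hget1] at hdv
          exact ⟨(Option.some_inj.mp hdv).symm, h2⟩
        · rw [if_neg h2] at hdv
          simp at hdv
      have hc0 : ∀ dold, pvDist (pvPA l) c = some dold → dold < dnew := by
        intro dold hd
        obtain ⟨hval, h2⟩ := hdist0 c dold hd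
        have hlast := pvLast_le c hne
        rw [hfirst] at hdnew
        omega
      have h2 : ∀ k ∈ ks₂, ∀ dv, pvDist (pvPA l) k = some dv → dv < dnew := by
        intro k hk dv hdv
        obtain ⟨hval, hcnt2⟩ := hdist0 k dv hdv
        have hkl : k ∈ l := List.count_pos_iff.mp (by omega)
        have hlast := pvLast_le k hne
        have horder := hks₂ k hk
        have hkflt : pvFirst l k < l.length := pvFirst_lt_length hkl
        rw [hfirst] at hdnew
        omega
      have hb : (0 : Int) < dnew := by
        rw [hfirst] at hdnew
        omega
      rw [hsp, pvF_insert _ _ ks₁ ks₂ c dnew ("0", 0) hdist1c hagree hc0 h2 hn1 hn2,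
        ← hsp, ← ih]
    · -- first occurrence: B only records the index; A's abstract fold gains key c with no
      -- second occurrence, so its pick loop ignores it
      have hcont : (pvPA l).1.contains c = false := by rw [pvPA_contains]; simp [hm]
      have hbcont : (pvPB l).1.contains c = false := by rw [pvPB_fst]; exact hcont
      have hP' : pvPA (l ++ [c])
          = ((pvPA l).1.insert c (l.length : Int), (pvPA l).2) := by
        rw [pvPA_append]; simp [dslUpd, hcont]
      have hstep : dslAltStep (pvPB l) ((l.length : Int), c)
          = ((pvPB l).1.insert c (l.length : Int), (pvPB l).2) := by
        simp [dslAltStep, hbcont]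
      rw [hstep, if_neg hm, hP']
      dsimp only
      have hcong : ∀ k ∈ PySem.List.dedup l,
          pvDist ((pvPA l).1.insert c (l.length : Int), (pvPA l).2) k
            = pvDist (pvPA l) k := by
        intro k hk
        have hkc : k ≠ c := fun he => hm (he ▸ (PySem.List.mem_dedup l k).mp hk)
        unfold pvDist
        rw [PySem.Dict.getD_insert, if_neg hkc]
      have hnone : pvDist ((pvPA l).1.insert c (l.length : Int), (pvPA l).2) c
          = none := by
        have h0 : ¬ 2 ≤ List.count c l := by
          rw [List.count_eq_zero.mpr hm]
          omega
        unfold pvDist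
        rw [PySem.Dict.contains_eq_isSome_get?, pvPA2_get?, if_neg h0]
        rfl
      have happ : ∀ (dist : Char → Option Int) (bb : String × Int),
          pvF dist (PySem.List.dedup l ++ [c]) bb
            = pvF dist [c] (pvF dist (PySem.List.dedup l) bb) := by
        intro dist bb
        unfold pvF
        rw [List.foldl_append]
      rw [happ]
      rw [pvF_congr _ _ _ _ hcong]
      rw [← ih]
      unfold pvF
      rw [List.foldl_cons, hnone]
      rfl

-- ===== VERDICT (by name: the statement is the Claim_ definition above) =====
theorem dsl_spec : Claim_equal_dsl := by
  intro string _
  unfold Spec_dsl dsl dsl_alt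
  dsimp only
  have hlen : PySem.Str.len string = PySem.List.len string.toList := by
    simp [PySem.Str.len_eq, PySem.List.len_eq]
  rw [hlen]
  have hA : (PySem.List.pyRange 0 (PySem.List.len string.toList) 1).foldl
      (fun st index => dslUpd st index (PySem.List.pyGetD string.toList index ' '))
      (PySem.Dict.empty, PySem.Dict.empty) = pvPA string.toList := by
    unfold pvPA
    rw [PySem.List.enumerate_eq_map_pyRange string.toList ' ', List.foldl_map]
  rw [hA, pvPick_eq_pvF, pvPA_keys, ← pvPB_snd]
  rfl
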